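-- pv_equiv track=rewrite | github.com/binhmop/tsbitmaps | tsbitmaps/tsbitmapper.py | bitmap_distance
-- ===== SOURCE A (Python) =====
-- def bitmap_distance(lag_bitmap, lead_bitmap):
--     """
--     Computes the dissimilarity of two bitmaps
--     """
--     dist = 0
--     lag_feats = set(lag_bitmap.keys())
--     lead_feats = set(lead_bitmap.keys())
--     shared_feats = lag_feats & lead_feats
--
--     for feat in shared_feats:
--         dist += (lead_bitmap[feat] - lag_bitmap[feat]) ** 2
--
--     for feat in lag_feats - shared_feats:
--         dist += lag_bitmap[feat] ** 2
--
--     for feat in lead_feats - shared_feats: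
--         dist += lead_bitmap[feat] ** 2
--
--     return dist
-- ===== SOURCE B (Python) =====
-- def bitmap_distance(lag_bitmap, lead_bitmap):
--     """
--     Computes the dissimilarity of two bitmaps
--     """
--     # polarization identity: ||x - y||^2 = ||x||^2 + ||y||^2 - 2 <x, y>
--     dist = sum(v * v for v in lag_bitmap.values()) + sum(v * v for v in lead_bitmap.values())
--     for feat, v in lag_bitmap.items():
--         if feat in lead_bitmap:
--             dist -= 2 * v * lead_bitmap[feat]
--     return dist
-- ===== Notes on version B (the rewrite author's own statement) =====
-- stated objective: alternative
-- what changed: B computes the distance via the polarization identity ||x-y||^2 = ||x||^2 + ||y||^2 - 2<x,y>: it sums the squares of each dict's values directly and subtracts twice the inner product over shared keys, instead of A's three set-difference partitions with per-key squared differences.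
import Mathlib
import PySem

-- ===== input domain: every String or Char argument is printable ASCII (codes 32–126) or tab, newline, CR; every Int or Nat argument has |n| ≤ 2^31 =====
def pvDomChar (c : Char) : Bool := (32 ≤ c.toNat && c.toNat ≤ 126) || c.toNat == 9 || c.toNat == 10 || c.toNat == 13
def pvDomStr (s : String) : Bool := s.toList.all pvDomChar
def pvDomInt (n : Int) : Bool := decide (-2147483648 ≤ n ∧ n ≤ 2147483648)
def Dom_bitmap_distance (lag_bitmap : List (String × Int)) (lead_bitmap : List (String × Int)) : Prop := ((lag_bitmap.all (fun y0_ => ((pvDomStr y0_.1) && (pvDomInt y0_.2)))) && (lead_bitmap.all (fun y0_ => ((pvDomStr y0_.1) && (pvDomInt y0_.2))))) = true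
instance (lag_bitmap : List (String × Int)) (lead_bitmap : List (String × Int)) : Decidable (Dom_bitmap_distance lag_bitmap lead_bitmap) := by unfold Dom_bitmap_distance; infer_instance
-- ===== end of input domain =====

-- B computes the same distance via the polarization identity ||x-y||^2 = ||x||^2 + ||y||^2 - 2<x,y> (sum of squared values of each dict minus twice the inner product over shared keys) instead of A's three key-set partitions (objective: alternative).


-- ===== PORT A =====
def bitmap_distance (lag_bitmap : List (String × Int)) (lead_bitmap : List (String × Int)) : Int :=
  let lag := PySem.Dict.ofList lag_bitmap
  let lead := PySem.Dict.ofList lead_bitmap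
  let dist : Int := 0
  let lag_feats := PySem.Set.ofList lag.keys
  let lead_feats := PySem.Set.ofList lead.keys
  let shared_feats := PySem.Set.inter lag_feats lead_feats
  let dist := shared_feats.foldl (fun d feat => d + (lead.getD feat 0 - lag.getD feat 0) ^ 2) dist
  let dist := (PySem.Set.diff lag_feats shared_feats).foldl (fun d feat => d + (lag.getD feat 0) ^ 2) dist
  let dist := (PySem.Set.diff lead_feats shared_feats).foldl (fun d feat => d + (lead.getD feat 0) ^ 2) dist
  dist

-- ===== PORT B =====
def bitmap_distance_alt (lag_bitmap : List (String × Int)) (lead_bitmap : List (String × Int)) : Int :=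
  let lag := PySem.Dict.ofList lag_bitmap
  let lead := PySem.Dict.ofList lead_bitmap
  let dist : Int := (lag.values.map (fun v => v * v)).sum + (lead.values.map (fun v => v * v)).sum
  lag.items.foldl
    (fun d p => if lead.contains p.1 then d - 2 * p.2 * lead.getD p.1 0 else d) dist

-- ===== PRECONDITION & SPEC =====
def Spec_bitmap_distance (lag_bitmap : List (String × Int)) (lead_bitmap : List (String × Int)) (out : Int) : Prop := out = bitmap_distance_alt lag_bitmap lead_bitmap
instance (lag_bitmap : List (String × Int)) (lead_bitmap : List (String × Int)) (out : Int) : Decidable (Spec_bitmap_distance lag_bitmap lead_bitmap out) := by unfold Spec_bitmap_distance; infer_instance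

-- ===== CLAIM (what is proved, stated in full; the proofs are below) =====
def Claim_equal_bitmap_distance : Prop := ∀ (lag_bitmap : List (String × Int)) (lead_bitmap : List (String × Int)), Dom_bitmap_distance lag_bitmap lead_bitmap → Spec_bitmap_distance lag_bitmap lead_bitmap (bitmap_distance lag_bitmap lead_bitmap)

-- ===== LEMMAS AND PROOFS =====

-- sum of f over a filtered list = sum over the whole list with the predicate as a 0-guard
theorem sum_map_filter_eq_sum_ite (p : String → Bool) (f : String → Int) (l : List String) :
    ((l.filter p).map f).sum = (l.map (fun x => if p x then f x else 0)).sum := by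
  induction l with
  | nil => rfl
  | cons a t ih => by_cases h : p a <;> simp [h, ih]

-- summing over the intersection may be done from either side (both lists Nodup)
theorem sum_inter_comm (L R : List String) (hL : L.Nodup) (hR : R.Nodup) (f : String → Int) :
    ((L.filter (fun x => R.contains x)).map f).sum
      = ((R.filter (fun x => L.contains x)).map f).sum := by
  have hperm : (L.filter (fun x => R.contains x)).Perm (R.filter (fun x => L.contains x)) := by
    rw [List.perm_ext_iff_of_nodup (hL.filter _) (hR.filter _)]
    intro x
    simp only [List.mem_filter, List.contains_iff_mem]
    tauto
  exact (hperm.map f).sum_eq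

-- the polarization identity, stated over the key lists: A's three partitioned sums
-- equal B's two value-square sums plus the cross term over shared keys
theorem key_identity (L R : List String) (hL : L.Nodup) (hR : R.Nodup) (la le : String → Int) :
    ((L.filter (fun x => R.contains x)).map (fun k => (le k - la k) ^ 2)).sum
      + ((L.filter (fun x => !((L.filter (fun y => R.contains y)).contains x))).map (fun k => (la k) ^ 2)).sum
      + ((R.filter (fun x => !((L.filter (fun y => R.contains y)).contains x))).map (fun k => (le k) ^ 2)).sum
    = ((L.map (fun k => la k * la k)).sum + (R.map (fun k => le k * le k)).sum)
      + (L.map (fun k => if R.contains k then -(2 * la k * le k) else 0)).sum := by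
  rw [sum_map_filter_eq_sum_ite, sum_map_filter_eq_sum_ite, sum_map_filter_eq_sum_ite]
  -- clean up the diff predicates using membership in the base list
  have h2 : (L.map (fun x => if !((L.filter (fun y => R.contains y)).contains x) then (la x) ^ 2 else 0)).sum
      = (L.map (fun x => if R.contains x then 0 else la x * la x)).sum := by
    apply congrArg
    apply List.map_congr_left
    intro x hx
    by_cases h : x ∈ R <;>
      simp [List.contains_iff_mem, List.mem_filter, hx, h, sq]
  have h3 : (R.map (fun x => if !((L.filter (fun y => R.contains y)).contains x) then (le x) ^ 2 else 0)).sum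
      = (R.map (fun x => if L.contains x then 0 else le x * le x)).sum := by
    apply congrArg
    apply List.map_congr_left
    intro x hx
    by_cases h : x ∈ L <;>
      simp [List.contains_iff_mem, List.mem_filter, hx, h, sq]
  rw [h2, h3]
  -- split Σ_R le² along membership in L
  have hsplitR : (R.map (fun k => le k * le k)).sum
      = (R.map (fun k => if L.contains k then le k * le k else 0)).sum
        + (R.map (fun k => if L.contains k then 0 else le k * le k)).sum := by
    rw [← PySem.List.sum_map_add_int]
    apply congrArg
    apply List.map_congr_left
    intro x _
    by_cases h : x ∈ L <;> simp [List.contains_iff_mem, h]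
  -- swap the intersection sum to the L side
  have hswap : (R.map (fun k => if L.contains k then le k * le k else 0)).sum
      = (L.map (fun k => if R.contains k then le k * le k else 0)).sum := by
    rw [← sum_map_filter_eq_sum_ite, ← sum_map_filter_eq_sum_ite]
    exact (sum_inter_comm L R hL hR fun k => le k * le k).symm
  -- pointwise identity on the L side: [k∈R](le−la)² + [k∉R]la² = la² + [k∈R]le² − [k∈R]2·la·le
  have hLside : (L.map (fun x => if R.contains x then (le x - la x) ^ 2 else 0)).sum
        + (L.map (fun x => if R.contains x then 0 else la x * la x)).sum
      = (L.map (fun k => la k * la k)).sum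
        + (L.map (fun k => if R.contains k then le k * le k else 0)).sum
        + (L.map (fun k => if R.contains k then -(2 * la k * le k) else 0)).sum := by
    rw [← PySem.List.sum_map_add_int, ← PySem.List.sum_map_add_int, ← PySem.List.sum_map_add_int]
    apply congrArg
    apply List.map_congr_left
    intro x _
    by_cases h : x ∈ R <;> simp [List.contains_iff_mem, h] <;> ring
  linarith [hLside, hsplitR, hswap]

-- ===== VERDICT (by name: the statement is the Claim_ definition above) =====
theorem bitmap_distance_spec : Claim_equal_bitmap_distance := by
  intro lag_bitmap lead_bitmap _
  unfold Spec_bitmap_distance bitmap_distance bitmap_distance_alt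
  set lag := PySem.Dict.ofList lag_bitmap with hlag
  set lead := PySem.Dict.ofList lead_bitmap with hlead
  have hndL : lag.keys.Nodup := PySem.Dict.nodup_keys_ofList lag_bitmap
  have hndR : lead.keys.Nodup := PySem.Dict.nodup_keys_ofList lead_bitmap
  simp only [PySem.Set.ofList_eq_self_of_nodup _ hndL, PySem.Set.ofList_eq_self_of_nodup _ hndR]
  -- B's loop as init + a sum
  have hfun : (fun (d : Int) (p : String × Int) => if lead.contains p.1 then d - 2 * p.2 * lead.getD p.1 0 else d)
      = (fun d p => d + (if lead.contains p.1 then -(2 * p.2 * lead.getD p.1 0) else 0)) := by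
    funext d p; split <;> ring
  rw [hfun, PySem.List.foldl_add, PySem.List.foldl_add, PySem.List.foldl_add, PySem.List.foldl_add]
  rw [PySem.Dict.items_eq_map_keys lag hndL 0,
      PySem.Dict.values_eq_map_keys lag hndL 0, PySem.Dict.values_eq_map_keys lead hndR 0,
      List.map_map, List.map_map, List.map_map]
  have hcont : ∀ k : String, lead.contains k = lead.keys.contains k := by
    intro k
    rcases h : lead.contains k with _|_
    · rcases h2 : lead.keys.contains k with _|_
      · rfl
      · exact absurd ((PySem.Dict.contains_iff_mem_keys _ _).mpr (List.contains_iff_mem.mp h2)) (by simp [h])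
    · exact (List.contains_iff_mem.mpr ((PySem.Dict.contains_iff_mem_keys _ _).mp h)).symm
  have hID := key_identity lag.keys lead.keys hndL hndR (fun k => lag.getD k 0) (fun k => lead.getD k 0)
  simp only [PySem.Set.inter, PySem.Set.diff, PySem.Set.contains, Function.comp_def, hcont]
  linarith [hID]
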